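-- pv_equiv track=rewrite | github.com/miethe/MeatyMusic | services/api/app/skills/lyrics.py | _calculate_hook_density
-- ===== SOURCE A (Python) =====
-- from typing import Any, Dict, List
--
-- def _calculate_hook_density(lyrics: str, section_order: List[str]) -> int:
--     """Calculate hook density (number of hook occurrences).
--
--     Args:
--         lyrics: Complete lyrics text
--         section_order: List of sections
--
--     Returns:
--         Count of hook occurrences
--     """
--     # Extract chorus sections
--     chorus_sections = [s for s in lyrics.split("\n\n") if "Chorus" in s]
--
--     if not chorus_sections:
--         return 0
--
--     # Find most common line in choruses (likely the hook)
--     chorus_lines = []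
--     for section in chorus_sections:
--         lines = [l.strip() for l in section.split("\n") if l.strip() and not l.startswith("[")]
--         chorus_lines.extend(lines)
--
--     # Count line frequencies
--     line_counts = {}
--     for line in chorus_lines:
--         line_counts[line] = line_counts.get(line, 0) + 1
--
--     # Hook is the most repeated line
--     if not line_counts:
--         return 0
--
--     max_count = max(line_counts.values())
--     return max_count
-- ===== SOURCE B (Python) =====
-- from typing import Any, Dict, List
--
--
-- def _calculate_hook_density(lyrics: str, section_order: List[str]) -> int:
--     """Count of the most repeated line across chorus sections (the hook).
--
--     Sort-and-group: sort the chorus lines so equal lines become adjacent,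
--     then one linear scan finds the longest run of consecutive equal lines,
--     which is exactly the highest line frequency.
--     """
--     chorus_lines = sorted(
--         line.strip()
--         for section in lyrics.split("\n\n") if "Chorus" in section
--         for line in section.split("\n")
--         if line.strip() and not line.startswith("[")
--     )
--     best = run = 0
--     prev = None
--     for line in chorus_lines:
--         run = run + 1 if line == prev else 1
--         if run > best:
--             best = run
--         prev = line
--     return best
-- ===== Notes on version B (the rewrite author's own statement) =====
-- stated objective: alternative
-- what changed: Replaces A's hash-counting (frequency dict + max over its values) by sort-and-group: sort the chorus lines and take the longest run of consecutive equal lines in a single scan; A's two guard returns collapse into the empty-scan result 0.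
import Mathlib
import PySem

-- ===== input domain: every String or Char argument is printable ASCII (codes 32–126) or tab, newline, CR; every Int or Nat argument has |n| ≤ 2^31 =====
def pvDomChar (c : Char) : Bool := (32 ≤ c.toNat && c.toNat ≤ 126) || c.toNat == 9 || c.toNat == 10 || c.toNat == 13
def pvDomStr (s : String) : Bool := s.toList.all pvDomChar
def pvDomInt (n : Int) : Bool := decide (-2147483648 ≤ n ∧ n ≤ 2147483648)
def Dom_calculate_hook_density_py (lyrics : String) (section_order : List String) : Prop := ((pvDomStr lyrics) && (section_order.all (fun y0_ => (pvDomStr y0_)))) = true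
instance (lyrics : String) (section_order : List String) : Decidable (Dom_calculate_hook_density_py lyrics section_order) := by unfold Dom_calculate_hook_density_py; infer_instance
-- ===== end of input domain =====

-- B replaces A's frequency dict and max-over-values by sort-and-group: sort the chorus lines
-- and take the longest run of consecutive equal lines in one scan — same return value
-- everywhere (neither version has side effects).

-- ===== PORT A =====
-- s.split(sep) with a nonempty literal sep: split? is always `some` here, the .getD [] default is unreachable
def calculate_hook_density_py (lyrics : String) (section_order : List String) : Int :=
  let chorus_sections := ((PySem.Str.split? lyrics "\n\n").getD []).filter (fun s => PySem.Str.isIn "Chorus" s)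
  if chorus_sections = [] then 0
  else
    let chorus_lines := chorus_sections.foldl
      (fun acc sec => acc ++ (((PySem.Str.split? sec "\n").getD []).filter
          (fun l => PySem.Str.strip l != "" && !PySem.Str.startswith l "[")).map (fun l => PySem.Str.strip l)) []
    let line_counts := chorus_lines.foldl (fun d line => d.insert line (d.getD line 0 + 1)) PySem.Dict.empty
    if line_counts.size = 0 then 0
    else (PySem.List.max? line_counts.values (fun v => v)).getD 0
    -- max() is applied only on the guarded-nonempty dict's values, so its .getD 0 default is unreachable

-- ===== PORT B =====
-- one iteration of Source B's scan loop: state (best, run, prev)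
def pvStep (st : Int × Int × Option String) (line : String) : Int × Int × Option String :=
  let run := if some line = st.2.2 then st.2.1 + 1 else 1
  (if run > st.1 then run else st.1, run, some line)

def calculate_hook_density_py_alt (lyrics : String) (section_order : List String) : Int :=
  let chorus_lines := PySem.List.sorted
    ((((PySem.Str.split? lyrics "\n\n").getD []).filter (fun s => PySem.Str.isIn "Chorus" s)).flatMap
      (fun sec => (((PySem.Str.split? sec "\n").getD []).filter
          (fun l => PySem.Str.strip l != "" && !PySem.Str.startswith l "[")).map (fun l => PySem.Str.strip l)))
    (fun s => s) false
  (chorus_lines.foldl pvStep (0, 0, none)).1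

-- ===== PRECONDITION & SPEC =====
def Spec_calculate_hook_density_py (lyrics : String) (section_order : List String) (out : Int) : Prop := out = calculate_hook_density_py_alt lyrics section_order
instance (lyrics : String) (section_order : List String) (out : Int) : Decidable (Spec_calculate_hook_density_py lyrics section_order out) := by unfold Spec_calculate_hook_density_py; infer_instance

-- ===== CLAIM (what is proved, stated in full; the proofs are below) =====
def Claim_equal_calculate_hook_density_py : Prop := ∀ (lyrics : String) (section_order : List String), Dom_calculate_hook_density_py lyrics section_order → Spec_calculate_hook_density_py lyrics section_order (calculate_hook_density_py lyrics section_order)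

-- ===== LEMMAS AND PROOFS =====

-- the common value both programs compute: the maximal line frequency (0 on the empty list)
def pvMaxCount (xs : List String) : Int :=
  (PySem.List.max? ((PySem.Set.ofList xs).map (fun v => (xs.count v : Int))) (fun v => v)).getD 0

-- max over two nonempty Int lists with the same members is the same value
theorem pv_max_getD_eq {L1 L2 : List Int} (h : ∀ v, v ∈ L1 ↔ v ∈ L2) (h1 : L1 ≠ []) :
    (PySem.List.max? L1 (fun v => v)).getD 0 = (PySem.List.max? L2 (fun v => v)).getD 0 := by
  obtain ⟨a, ha⟩ := List.exists_mem_of_ne_nil L1 h1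
  have h2 : L2 ≠ [] := by
    intro e; rw [e] at h; exact List.not_mem_nil ((h a).mp ha)
  obtain ⟨m1, hm1⟩ := Option.ne_none_iff_exists'.mp
    (fun e => h1 ((PySem.List.max?_eq_none_iff L1 (fun v => v)).mp e))
  obtain ⟨m2, hm2⟩ := Option.ne_none_iff_exists'.mp
    (fun e => h2 ((PySem.List.max?_eq_none_iff L2 (fun v => v)).mp e))
  rw [hm1, hm2]
  have le1 : m1 ≤ m2 := PySem.List.max?_isMax hm2 m1 ((h m1).mp (PySem.List.max?_mem hm1))
  have le2 : m2 ≤ m1 := PySem.List.max?_isMax hm1 m2 ((h m2).mpr (PySem.List.max?_mem hm2))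
  have := le_antisymm le1 le2
  simp [this]

-- max over a nonempty cons list of Ints, stripped of the Option
theorem pv_max_getD_cons (c : Int) (L : List Int) (hc : 0 ≤ c) :
    (PySem.List.max? (c :: L) (fun v => v)).getD 0 = max c ((PySem.List.max? L (fun v => v)).getD 0) := by
  obtain ⟨m, hm⟩ := Option.ne_none_iff_exists'.mp
    (fun e => (List.cons_ne_nil c L) ((PySem.List.max?_eq_none_iff (c :: L) (fun v => v)).mp e))
  rw [hm]
  rcases Decidable.em (L = []) with hL | hL
  · subst hL
    have hmc : m = c := by
      have h := PySem.List.max?_mem hm; simpa using h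
    subst hmc
    have h0 : (PySem.List.max? ([] : List Int) (fun v => v)) = none := rfl
    rw [h0]
    simp only [Option.getD_some, Option.getD_none]
    omega
  · obtain ⟨w, hw⟩ := Option.ne_none_iff_exists'.mp
      (fun e => hL ((PySem.List.max?_eq_none_iff L (fun v => v)).mp e))
    rw [hw]
    have hmMem : m ∈ c :: L := PySem.List.max?_mem hm
    have hmMax : ∀ y ∈ c :: L, y ≤ m := fun y hy => PySem.List.max?_isMax hm y hy
    have hwMem : w ∈ L := PySem.List.max?_mem hw
    have hwMax : ∀ y ∈ L, y ≤ w := fun y hy => PySem.List.max?_isMax hw y hy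
    simp only [Option.getD_some]
    apply le_antisymm
    · rcases List.mem_cons.mp hmMem with e | e
      · exact e ▸ le_max_left _ _
      · exact le_max_of_le_right (hwMax m e)
    · exact max_le (hmMax c (List.mem_cons_self)) (hmMax w (List.mem_cons_of_mem _ hwMem))

-- one step of the scan in closed form
theorem pvStep_mk (b r : Int) (p : Option String) (y : String) :
    pvStep (b, r, p) y = (max b (if some y = p then r + 1 else 1),
      (if some y = p then r + 1 else 1), some y) := by
  unfold pvStep
  split_ifs with h1 <;> simp [Prod.ext_iff] <;> omega

-- the best-so-far accumulator only ever grows by maxes, so an outer max commutes out of the fold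
theorem pv_f_max (l : List String) : ∀ (b x r : Int) (p : Option String),
    (l.foldl pvStep (max b x, r, p)).1 = max b ((l.foldl pvStep (x, r, p)).1) := by
  induction l with
  | nil => intro b x r p; rfl
  | cons y l ih =>
      intro b x r p
      rw [List.foldl_cons, List.foldl_cons, pvStep_mk, pvStep_mk, max_assoc]
      exact ih b (max x (if some y = p then r + 1 else 1)) _ (some y)

-- scanning a run of k further copies of the current line a raises run (and best) by k
theorem pv_run (a : String) (rest : List String) : ∀ (k : Nat) (b r : Int), r ≤ b →
    ((List.replicate k a ++ rest).foldl pvStep (b, r, some a))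
      = (rest.foldl pvStep (max b (r + k), r + k, some a)) := by
  intro k
  induction k with
  | zero =>
      intro b r hrb
      have h : max b (r + ((0 : Nat) : Int)) = b := by push_cast; omega
      have h' : r + ((0 : Nat) : Int) = r := by push_cast; omega
      rw [h, h', List.replicate_zero, List.nil_append]
  | succ k ih =>
      intro b r hrb
      rw [List.replicate_succ, List.cons_append, List.foldl_cons, pvStep_mk, if_pos rfl,
        ih (max b (r + 1)) (r + 1) (le_max_right _ _)]
      have e1 : max (max b (r + 1)) (r + 1 + (k : Int)) = max b (r + ((k : Nat) + 1 : Nat)) := by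
        push_cast; omega
      have e2 : r + 1 + (k : Int) = r + ((k : Nat) + 1 : Nat) := by push_cast; omega
      rw [e1, e2]

-- a line different from prev resets the run: the scan of rest restarts as from the empty state
theorem pv_reset (a : String) (rest : List String) (b r : Int) (ha : a ∉ rest) (hb : 0 ≤ b) :
    (rest.foldl pvStep (b, r, some a)).1 = max b ((rest.foldl pvStep (0, 0, none)).1) := by
  cases rest with
  | nil =>
      show b = max b 0
      omega
  | cons y l =>
      have hya' : y ≠ a := fun e => ha (e ▸ List.mem_cons_self)
      have hya : ¬ (some y = some a) := by simpa using hya'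
      rw [List.foldl_cons, List.foldl_cons, pvStep_mk, pvStep_mk, if_neg hya,
        if_neg (by simp : ¬ (some y = (none : Option String)))]
      have h0 : max (0 : Int) 1 = 1 := by omega
      rw [h0]
      exact pv_f_max l b 1 1 (some y)

-- a sorted nonempty list decomposes as a leading run of its head followed by a sorted remainder without it
theorem pv_decomp (t : List String) : ∀ (a : String), (a :: t).Pairwise (· ≤ ·) →
    ∃ (k : Nat) (rest : List String), t = List.replicate k a ++ rest ∧ a ∉ rest ∧ rest.Pairwise (· ≤ ·) := by
  induction t with
  | nil => intro a _; exact ⟨0, [], rfl, List.not_mem_nil, List.Pairwise.nil⟩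
  | cons y t' ih =>
      intro a h
      rcases Decidable.em (y = a) with e | e
      · subst e
        obtain ⟨k, rest, ht, har, hp⟩ := ih y (List.pairwise_cons.mp h).2
        exact ⟨k + 1, rest, by rw [List.replicate_succ, List.cons_append, ht], har, hp⟩
      · refine ⟨0, y :: t', rfl, ?_, (List.pairwise_cons.mp h).2⟩
        intro hmem
        rcases List.mem_cons.mp hmem with e' | hmem'
        · exact e (e'.symm)
        · have hay : a ≤ y := (List.pairwise_cons.mp h).1 y List.mem_cons_self
          have hya : y ≤ a := (List.pairwise_cons.mp ((List.pairwise_cons.mp h).2)).1 a hmem'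
          exact e (le_antisymm hya hay)

-- the run scan of a sorted list computes the maximal element frequency
theorem pv_runScan : ∀ (n : Nat) (xs : List String), xs.length ≤ n → xs.Pairwise (· ≤ ·) →
    (xs.foldl pvStep (0, 0, none)).1 = pvMaxCount xs := by
  intro n
  induction n with
  | zero =>
      intro xs hlen _
      have : xs = [] := List.eq_nil_of_length_eq_zero (Nat.le_zero.mp hlen)
      subst this; rfl
  | succ n ih =>
      intro xs hlen hp
      cases xs with
      | nil => rfl
      | cons a t =>
          obtain ⟨k, rest, ht, har, hpr⟩ := pv_decomp t a hp
          subst ht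
          -- left side: first step, then the run, then the reset
          have hs0 : pvStep (0, 0, none) a = ((1 : Int), (1 : Int), some a) := by
            rw [pvStep_mk, if_neg (by simp : ¬ (some a = (none : Option String)))]
            have h0 : max (0 : Int) 1 = 1 := by omega
            rw [h0]
          have hL : ((a :: (List.replicate k a ++ rest)).foldl pvStep (0, 0, none)).1
              = max (1 + (k : Int)) ((rest.foldl pvStep (0, 0, none)).1) := by
            rw [List.foldl_cons, hs0, pv_run a rest k 1 1 le_rfl]
            have : max 1 (1 + (k : Int)) = 1 + (k : Int) := by
              have : (0 : Int) ≤ (k : Int) := Int.natCast_nonneg k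
              omega
            rw [this]
            exact pv_reset a rest (1 + (k : Int)) (1 + (k : Int)) har (by positivity)
          have hrest : (rest.foldl pvStep (0, 0, none)).1 = pvMaxCount rest := by
            refine ih rest ?_ hpr
            have := hlen
            simp only [List.length_cons, List.length_append, List.length_replicate] at this
            omega
          -- right side: the counts of a :: replicate k a ++ rest are (k+1) together with rest's counts
          have hcnt_a : (a :: (List.replicate k a ++ rest)).count a = k + 1 := by
            rw [List.count_cons_self, List.count_append, List.count_replicate_self,
              List.count_eq_zero.mpr har]
          have hcnt_ne : ∀ v, v ≠ a → (a :: (List.replicate k a ++ rest)).count v = rest.count v := by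
            intro v hv
            have hv' : a ≠ v := fun e => hv e.symm
            have h1 : (List.replicate k a).count v = 0 := by
              simp [List.count_replicate, hv']
            rw [List.count_cons_of_ne hv', List.count_append, h1, Nat.zero_add]
          have hmem : ∀ (w : Int),
              w ∈ (PySem.Set.ofList (a :: (List.replicate k a ++ rest))).map
                    (fun v => ((a :: (List.replicate k a ++ rest)).count v : Int))
              ↔ w ∈ ((k : Int) + 1) :: (PySem.Set.ofList rest).map (fun v => (rest.count v : Int)) := by
            intro w
            simp only [List.mem_map, PySem.Set.mem_ofList, List.mem_cons]
            constructor
            · rintro ⟨u, hu, rfl⟩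
              rcases Decidable.em (u = a) with e | e
              · subst e; left; rw [hcnt_a]; push_cast; ring
              · right
                have humem : u ∈ rest := by
                  rcases hu with e' | h'
                  · exact absurd e' e
                  · rcases List.mem_append.mp h' with h'' | h''
                    · exact absurd (List.eq_of_mem_replicate h'') e
                    · exact h''
                exact ⟨u, humem, by rw [hcnt_ne u e]⟩
            · rintro (rfl | ⟨u, hu, rfl⟩)
              · exact ⟨a, Or.inl rfl, by rw [hcnt_a]; push_cast; ring⟩
              · have hua : u ≠ a := fun e => har (e ▸ hu)
                exact ⟨u, Or.inr (List.mem_append_right _ hu), by rw [hcnt_ne u hua]⟩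
          have hne : ((PySem.Set.ofList (a :: (List.replicate k a ++ rest))).map
                (fun v => ((a :: (List.replicate k a ++ rest)).count v : Int))) ≠ [] := by
            intro e
            have : a ∈ PySem.Set.ofList (a :: (List.replicate k a ++ rest)) :=
              (PySem.Set.mem_ofList _ a).mpr List.mem_cons_self
            rcases List.map_eq_nil_iff.mp e with e'
            rw [e'] at this
            exact List.not_mem_nil this
          have hR : pvMaxCount (a :: (List.replicate k a ++ rest))
              = max ((k : Int) + 1) (pvMaxCount rest) := by
            unfold pvMaxCount
            rw [pv_max_getD_eq hmem hne, pv_max_getD_cons _ _ (by positivity)]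
          rw [hL, hrest, hR]
          have : (1 : Int) + (k : Int) = (k : Int) + 1 := by ring
          rw [this]

-- sorting does not change the set of lines nor their counts, hence not the maximal frequency
theorem pv_maxCount_sorted (xs : List String) :
    pvMaxCount (PySem.List.sorted xs (fun s => s) false) = pvMaxCount xs := by
  rcases Decidable.em (xs = []) with e | e
  · subst e; rfl
  · have hperm : (PySem.List.sorted xs (fun s => s) false).Perm xs := PySem.List.sorted_perm xs (fun s => s) false
    unfold pvMaxCount
    refine pv_max_getD_eq ?_ ?_
    · intro w
      simp only [List.mem_map, PySem.Set.mem_ofList]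
      constructor
      · rintro ⟨u, hu, rfl⟩
        exact ⟨u, hperm.mem_iff.mp hu, by rw [hperm.count_eq]⟩
      · rintro ⟨u, hu, rfl⟩
        exact ⟨u, hperm.mem_iff.mpr hu, by rw [hperm.count_eq]⟩
    · intro h
      obtain ⟨a, ha⟩ := List.exists_mem_of_ne_nil xs e
      have : a ∈ PySem.Set.ofList (PySem.List.sorted xs (fun s => s) false) :=
        (PySem.Set.mem_ofList _ a).mpr (hperm.mem_iff.mpr ha)
      rcases List.map_eq_nil_iff.mp h with e'
      rw [e'] at this
      exact List.not_mem_nil this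

-- A's append loop over the chorus sections, written as a flat map
theorem pv_lines (cs : List String) :
    cs.foldl (fun acc sec => acc ++ (((PySem.Str.split? sec "\n").getD []).filter
        (fun l => PySem.Str.strip l != "" && !PySem.Str.startswith l "[")).map (fun l => PySem.Str.strip l)) []
    = cs.flatMap (fun sec => (((PySem.Str.split? sec "\n").getD []).filter
        (fun l => PySem.Str.strip l != "" && !PySem.Str.startswith l "[")).map (fun l => PySem.Str.strip l)) :=
  (PySem.List.foldl_append_eq_flatMap
    (fun sec => (((PySem.Str.split? sec "\n").getD []).filter
        (fun l => PySem.Str.strip l != "" && !PySem.Str.startswith l "[")).map (fun l => PySem.Str.strip l))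
    cs []).trans (List.nil_append _)

-- A's tail (the guards, the frequency dict and the max over its values) computes pvMaxCount
theorem pv_A_tail (cs xs : List String) (hnil : cs = [] → xs = []) :
    (if cs = [] then (0 : Int)
     else
       if (xs.foldl (fun d line => d.insert line (d.getD line 0 + 1))
             (PySem.Dict.empty : PySem.Dict String Int)).size = 0 then 0
       else (PySem.List.max? (xs.foldl (fun d line => d.insert line (d.getD line 0 + 1))
               (PySem.Dict.empty : PySem.Dict String Int)).values (fun v => v)).getD 0)
    = pvMaxCount xs := by
  by_cases hcs : cs = []
  · subst hcs; rw [hnil rfl]; rfl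
  · rw [if_neg hcs, PySem.Dict.foldl_insert_getD_add_one_eq_counter]
    by_cases hxs : xs = []
    · subst hxs; rfl
    · have hvals : (PySem.Dict.counter xs).values
          = (PySem.Set.ofList xs).map (fun k => (xs.count k : Int)) := by
        simp [PySem.Dict.values, PySem.Dict.items_counter, List.map_map, Function.comp]
      have hsize : (PySem.Dict.counter xs).size ≠ 0 := by
        have hs : (PySem.Dict.counter xs).size = (PySem.Set.ofList xs).length := by
          simp [PySem.Dict.size, PySem.Dict.items_counter]
        rw [hs]
        intro e
        obtain ⟨a, ha⟩ := List.exists_mem_of_ne_nil xs hxs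
        have : a ∈ PySem.Set.ofList xs := (PySem.Set.mem_ofList xs a).mpr ha
        rw [List.length_eq_zero_iff.mp e] at this
        exact List.not_mem_nil this
      rw [if_neg hsize, hvals]
      rfl

-- ===== VERDICT (by name: the statement is the Claim_ definition above) =====
theorem calculate_hook_density_py_spec : Claim_equal_calculate_hook_density_py := by
  intro lyrics section_order _
  unfold Spec_calculate_hook_density_py calculate_hook_density_py calculate_hook_density_py_alt
  simp only [pv_lines]
  set xs := (((PySem.Str.split? lyrics "\n\n").getD []).filter (fun s => PySem.Str.isIn "Chorus" s)).flatMap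
      (fun sec => (((PySem.Str.split? sec "\n").getD []).filter
          (fun l => PySem.Str.strip l != "" && !PySem.Str.startswith l "[")).map (fun l => PySem.Str.strip l)) with hxs
  rw [pv_A_tail _ xs (fun e => by rw [hxs, e]; rfl)]
  rw [pv_runScan (PySem.List.sorted xs (fun s => s) false).length _ le_rfl (PySem.List.sorted_pairwise xs (fun s => s))]
  exact (pv_maxCount_sorted xs).symm
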